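-- pv_equiv track=rewrite | github.com/DingQiang2018/verigray | ambiguity_detector.py | worst_label_original
-- ===== SOURCE A (Python) =====
-- def worst_label_original(sentences):
--     worst =''
--     for s in sentences:
--         if 'unwanted' in s['annotation'].lower():
--             return 'unwanted'
--         elif s['annotation']:
--             worst = s['annotation']
--     return worst
-- ===== SOURCE B (Python) =====
-- def worst_label_original(sentences):
--     items = list(sentences)
--     if any('unwanted' in s['annotation'].lower() for s in items):
--         return 'unwanted'
--     for s in reversed(items):
--         if s['annotation']:
--             return s['annotation']
--     return ''
-- ===== Notes on version B (the rewrite author's own statement) =====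
-- stated objective: alternative
-- what changed: Replaces A's single forward pass with a running 'worst' accumulator by an any-scan for 'unwanted' followed by a reverse search for the last non-empty annotation; no accumulator state is carried.
import Mathlib
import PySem

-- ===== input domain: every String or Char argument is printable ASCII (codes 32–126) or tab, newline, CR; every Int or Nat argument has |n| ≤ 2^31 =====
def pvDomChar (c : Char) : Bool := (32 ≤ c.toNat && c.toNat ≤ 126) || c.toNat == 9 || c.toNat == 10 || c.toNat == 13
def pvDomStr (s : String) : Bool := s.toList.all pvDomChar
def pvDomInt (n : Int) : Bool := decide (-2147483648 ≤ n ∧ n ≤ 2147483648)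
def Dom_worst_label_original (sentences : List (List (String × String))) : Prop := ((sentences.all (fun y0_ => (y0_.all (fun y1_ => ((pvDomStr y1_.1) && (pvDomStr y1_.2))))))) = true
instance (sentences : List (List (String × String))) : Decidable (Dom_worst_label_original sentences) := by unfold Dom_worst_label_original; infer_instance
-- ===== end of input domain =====

-- B replaces A's forward accumulator pass by an any-check for 'unwanted' plus a reverse
-- search for the last non-empty annotation (alternative decomposition, same cost).
-- Shared helpers: s['annotation'] lookup and its derived tests (exact under Pre_, which
-- guarantees the key is present wherever it is read).
def pvAnn (s : List (String × String)) : String :=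
  ((PySem.Dict.mk s).get? "annotation").getD ""

def pvHasKey (s : List (String × String)) : Bool :=
  ((PySem.Dict.mk s).get? "annotation").isSome

def pvUnw (s : List (String × String)) : Bool :=
  PySem.Str.isIn "unwanted" (PySem.Str.lower (pvAnn s))

-- ===== PORT A =====
def worstGoA : List (List (String × String)) → String → String
  | [], worst => worst
  | s :: rest, worst =>
    if pvUnw s then "unwanted"
    else if pvAnn s ≠ "" then worstGoA rest (pvAnn s)
    else worstGoA rest worst

def worst_label_original (sentences : List (List (String × String))) : String :=
  worstGoA sentences ""

-- ===== PORT B =====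
def worst_label_original_alt (sentences : List (List (String × String))) : String :=
  if sentences.any pvUnw then "unwanted"
  else
    match sentences.reverse.find? (fun s => pvAnn s != "") with
    | some s => pvAnn s
    | none => ""

-- ===== PRECONDITION & SPEC =====
-- A raises KeyError at the first sentence without an 'annotation' key, unless it has
-- already returned 'unwanted' at an earlier sentence; Pre_ admits exactly the inputs
-- on which A returns normally.
def Pre_worst_label_original (sentences : List (List (String × String))) : Prop :=
  sentences.all pvHasKey = true ∨ (sentences.takeWhile pvHasKey).any pvUnw = true

instance (sentences : List (List (String × String))) : Decidable (Pre_worst_label_original sentences) := by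
  unfold Pre_worst_label_original; infer_instance

def pvWitness_worst_label_original : (List (List (String × String))) :=
  [[("annotation", "B-LOC")], [("annotation", "")]]

def Spec_worst_label_original (sentences : List (List (String × String))) (out : String) : Prop :=
  out = worst_label_original_alt sentences
instance (sentences : List (List (String × String))) (out : String) : Decidable (Spec_worst_label_original sentences out) := by
  unfold Spec_worst_label_original; infer_instance

-- ===== CLAIM (what is proved, stated in full; the proofs are below) =====
def Claim_equal_worst_label_original : Prop := ∀ (sentences : List (List (String × String))), Dom_worst_label_original sentences → Pre_worst_label_original sentences → Spec_worst_label_original sentences (worst_label_original sentences)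

-- ===== LEMMAS AND PROOFS =====

-- A's accumulator pass equals: any-unwanted check, then last non-empty annotation (default w).
lemma worstGoA_eq (xs : List (List (String × String))) (w : String) :
    worstGoA xs w =
      if xs.any pvUnw then "unwanted"
      else
        match xs.reverse.find? (fun s => pvAnn s != "") with
        | some s => pvAnn s
        | none => w := by
  induction xs generalizing w with
  | nil => simp [worstGoA]
  | cons x xs ih =>
    by_cases hu : pvUnw x
    · simp [worstGoA, hu]
    · by_cases hne : pvAnn x = ""
      · simp [worstGoA, hu, hne, ih, List.find?_append]
      · cases h : xs.reverse.find? (fun s => pvAnn s != "") with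
        | none => simp [worstGoA, hu, hne, ih, List.find?_append, h]
        | some s => simp [worstGoA, hu, hne, ih, List.find?_append, h]

-- ===== VERDICT (by name: the statement is the Claim_ definition above) =====
theorem worst_label_original_spec : Claim_equal_worst_label_original := by
  intro sentences _ _
  unfold Spec_worst_label_original worst_label_original worst_label_original_alt
  rw [worstGoA_eq]
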